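-- pv_equiv track=rewrite | github.com/FireLegend03/LA2 | Programação dinâmica/Espaca.py | espaca
-- ===== SOURCE A (Python) =====
-- def espaca(frase, palavras):
--     l = frase
--     tamanho = len(frase) - 1
--     if frase == "":
--         return ""
--     else:
--         cont = 1
--         palavra = ""
--         for letra in range(tamanho, -1, -1):
--             palavra = frase[letra] + palavra
--             if palavra in palavras:
--                 n = " " + palavra
--                 r = (espaca(frase[:-cont], palavras)) + n
--                 if len(r) > len(l):
--                     l = r
--             cont += 1
--     return l
-- ===== SOURCE B (Python) =====
-- def espaca(frase, palavras):
--     # Bottom-up dynamic program over prefix lengths: dp[i] = best segmentation of frase[:i].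
--     words = set(palavras)
--     n = len(frase)
--     dp = [""] * (n + 1)
--     for i in range(1, n + 1):
--         best = frase[:i]
--         for j in range(i - 1, -1, -1):
--             w = frase[j:i]
--             if w in words:
--                 r = dp[j] + " " + w
--                 if len(r) > len(best):
--                     best = r
--         dp[i] = best
--     return dp[n]
-- ===== Notes on version B (the rewrite author's own statement) =====
-- stated objective: alternative
-- what changed: Replaced A's exponential top-down recursion over prefixes with a bottom-up dynamic program over prefix lengths (dp[i] = best segmentation of frase[:i]) plus a set for word membership.
import Mathlib
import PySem

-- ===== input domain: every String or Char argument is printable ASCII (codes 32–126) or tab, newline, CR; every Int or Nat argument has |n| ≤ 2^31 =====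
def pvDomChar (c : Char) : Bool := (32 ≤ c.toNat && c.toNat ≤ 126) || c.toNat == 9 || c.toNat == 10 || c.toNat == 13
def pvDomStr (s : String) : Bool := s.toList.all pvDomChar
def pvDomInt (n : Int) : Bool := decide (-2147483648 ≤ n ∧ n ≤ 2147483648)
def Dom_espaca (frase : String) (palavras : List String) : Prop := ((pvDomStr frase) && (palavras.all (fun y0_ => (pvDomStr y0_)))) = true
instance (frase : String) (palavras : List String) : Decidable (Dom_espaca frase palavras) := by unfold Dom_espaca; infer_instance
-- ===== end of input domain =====

-- B replaces A's top-down recursion over prefixes by a bottom-up dynamic program over prefix lengths (objective: alternative algorithm).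

-- ===== PORT A =====
-- inner 'for letra in range(tamanho, -1, -1)' loop of A; 'rec' is the recursive call on a prefix (fuel-staged below)
def pvLoopA (W : List (List Char)) (rec : List Char → List Char) (frase : List Char) (letra : Nat) (palavra l : List Char) : List Char :=
  let palavra' := frase.getD letra ' ' :: palavra   -- frase[letra], always in range here
  let l' := if palavra' ∈ W then
      let r := rec (frase.take letra) ++ ' ' :: palavra'   -- frase[:-cont] = frase[:letra]
      if l.length < r.length then r else l
    else l
  match letra with
  | 0 => l'
  | Nat.succ k => pvLoopA W rec frase k palavra' l'

-- A's recursion, fuel = length of the string (always sufficient; recursive calls are on strict prefixes)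
def pvCoreA (W : List (List Char)) : Nat → List Char → List Char
  | 0, _ => []
  | Nat.succ fuel, frase =>
    if frase = [] then []
    else pvLoopA W (pvCoreA W fuel) frase (frase.length - 1) [] frase

def espaca (frase : String) (palavras : List String) : String :=
  String.ofList (pvCoreA (palavras.map String.toList) frase.toList.length frase.toList)

-- ===== PORT B =====
-- inner 'for j in range(i - 1, -1, -1)' loop of B
def pvLoopB (W : PySem.Set (List Char)) (dp : List (List Char)) (frase : List Char) (i : Nat) (j : Nat) (best : List Char) : List Char :=
  let w := (frase.take i).drop j   -- frase[j:i]
  let best' := if w ∈ W then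
      let r := dp.getD j [] ++ ' ' :: w
      if best.length < r.length then r else best
    else best
  match j with
  | 0 => best'
  | Nat.succ k => pvLoopB W dp frase i k best'

-- dp table for prefix lengths 0..i (dp[0] = "")
def pvBuildB (W : PySem.Set (List Char)) (frase : List Char) : Nat → List (List Char)
  | 0 => [[]]
  | Nat.succ i =>
    let dp := pvBuildB W frase i
    dp ++ [pvLoopB W dp frase (i + 1) i (frase.take (i + 1))]

def espaca_alt (frase : String) (palavras : List String) : String :=
  let W := PySem.Set.ofList (palavras.map String.toList)
  let n := frase.toList.length
  String.ofList ((pvBuildB W frase.toList n).getD n [])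

-- ===== PRECONDITION & SPEC =====
def Spec_espaca (frase : String) (palavras : List String) (out : String) : Prop := out = espaca_alt frase palavras
instance (frase : String) (palavras : List String) (out : String) : Decidable (Spec_espaca frase palavras out) := by unfold Spec_espaca; infer_instance

-- ===== CLAIM (what is proved, stated in full; the proofs are below) =====
def Claim_equal_espaca : Prop := ∀ (frase : String) (palavras : List String), Dom_espaca frase palavras → Spec_espaca frase palavras (espaca frase palavras)

-- ===== LEMMAS AND PROOFS =====

-- pvLoopA only applies 'rec' to prefixes 'frase.take k' with k ≤ letra
theorem pvLoopA_congr (W : List (List Char)) (rec rec' : List Char → List Char) (frase : List Char)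
    (letra : Nat) (palavra l : List Char)
    (h : ∀ k, k ≤ letra → rec (frase.take k) = rec' (frase.take k)) :
    pvLoopA W rec frase letra palavra l = pvLoopA W rec' frase letra palavra l := by
  induction letra generalizing palavra l with
  | zero => simp only [pvLoopA, h 0 (le_refl 0)]
  | succ k ih =>
    simp only [pvLoopA, h (k + 1) (le_refl _)]
    exact ih _ _ (fun m hm => h m (Nat.le_succ_of_le hm))

-- fuel irrelevance: any fuel ≥ length computes the same value
theorem pvCoreA_fuel (W : List (List Char)) (fuel fuel' : Nat) (frase : List Char)
    (h : frase.length ≤ fuel) (h' : frase.length ≤ fuel') :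
    pvCoreA W fuel frase = pvCoreA W fuel' frase := by
  induction fuel generalizing fuel' frase with
  | zero =>
    have : frase = [] := List.eq_nil_of_length_eq_zero (Nat.le_zero.mp h)
    subst this
    cases fuel' with
    | zero => rfl
    | succ f => simp [pvCoreA]
  | succ f ihf =>
    cases fuel' with
    | zero =>
      have : frase = [] := List.eq_nil_of_length_eq_zero (Nat.le_zero.mp h')
      subst this; simp [pvCoreA]
    | succ f' =>
      by_cases hn : frase = []
      · subst hn; simp [pvCoreA]
      · simp only [pvCoreA, if_neg hn]
        apply pvLoopA_congr
        intro k hk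
        have hlen : (frase.take k).length ≤ k := by
          simp [List.length_take]
        have hl1 : frase.length - 1 < frase.length :=
          Nat.sub_lt (List.length_pos_of_ne_nil hn) Nat.one_pos
        have hkf : k ≤ f := le_trans hk (by omega)
        have hkf' : k ≤ f' := le_trans hk (by omega)
        exact ihf f' (frase.take k) (le_trans hlen hkf) (le_trans hlen hkf')

-- canonical (fuel = length) value of A on a string
def pvA (W : List (List Char)) (p : List Char) : List Char := pvCoreA W p.length p

theorem pvA_take (W : List (List Char)) (frase : List Char) (k : Nat) (fuel : Nat)
    (hfuel : k ≤ fuel) :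
    pvCoreA W fuel (frase.take k) = pvA W (frase.take k) := by
  have h : (frase.take k).length ≤ k := by simp [List.length_take]
  exact pvCoreA_fuel W fuel (frase.take k).length (frase.take k) (le_trans h hfuel) (le_refl _)

-- one step of the two inner loops coincides (index letra of A = index j of B)
theorem pvStep_eq (palavras : List String) (frase : List Char) (dp : List (List Char)) (i : Nat)
    (hi : i ≤ frase.length) (letra : Nat) (hletra : letra < i) (l : List Char)
    (hdp : dp.getD letra [] = pvA (palavras.map String.toList) (frase.take letra)) :
    (if (frase.take i).getD letra ' ' :: (frase.take i).drop (letra + 1) ∈ palavras.map String.toList then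
        (let r := pvA (palavras.map String.toList) ((frase.take i).take letra) ++ ' ' :: ((frase.take i).getD letra ' ' :: (frase.take i).drop (letra + 1));
         if l.length < r.length then r else l)
      else l)
    = (if (frase.take i).drop letra ∈ PySem.Set.ofList (palavras.map String.toList) then
        (let r := dp.getD letra [] ++ ' ' :: (frase.take i).drop letra;
         if l.length < r.length then r else l)
      else l) := by
  have hlen : (frase.take i).length = i := by simp [List.length_take]; omega
  have hlt : letra < (frase.take i).length := by omega
  have hdrop : (frase.take i).getD letra ' ' :: (frase.take i).drop (letra + 1) = (frase.take i).drop letra := by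
    rw [List.getD_eq_getElem _ _ hlt, ← List.drop_eq_getElem_cons hlt]
  have htake : (frase.take i).take letra = frase.take letra := by
    rw [List.take_take, Nat.min_eq_left (Nat.le_of_lt hletra)]
  rw [hdrop, htake, hdp]
  simp [PySem.Set.mem_ofList]

-- the two inner loops coincide, given dp correct below letra
theorem pvLoop_eq (palavras : List String) (frase : List Char) (dp : List (List Char)) (i : Nat)
    (hi : i ≤ frase.length) (letra : Nat) (hletra : letra < i) (l : List Char)
    (hdp : ∀ j, j ≤ letra → dp.getD j [] = pvA (palavras.map String.toList) (frase.take j)) :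
    pvLoopA (palavras.map String.toList) (pvA (palavras.map String.toList)) (frase.take i) letra
        ((frase.take i).drop (letra + 1)) l
      = pvLoopB (PySem.Set.ofList (palavras.map String.toList)) dp frase i letra l := by
  induction letra generalizing l with
  | zero =>
    simp only [pvLoopA, pvLoopB]
    exact pvStep_eq palavras frase dp i hi 0 hletra l (hdp 0 (le_refl 0))
  | succ k ih =>
    have hlen : (frase.take i).length = i := by simp [List.length_take]; omega
    have hlt : k + 1 < (frase.take i).length := by omega
    have hdrop : (frase.take i).getD (k + 1) ' ' :: (frase.take i).drop (k + 1 + 1) = (frase.take i).drop (k + 1) := by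
      rw [List.getD_eq_getElem _ _ hlt, ← List.drop_eq_getElem_cons hlt]
    simp only [pvLoopA, pvLoopB]
    rw [hdrop, List.take_take, Nat.min_eq_left (Nat.le_of_lt hletra), hdp (k + 1) (le_refl _)]
    simp only [PySem.Set.mem_ofList]
    exact ih (Nat.lt_of_succ_lt hletra) _ (fun m hm => hdp m (Nat.le_succ_of_le hm))

-- dp table correctness
theorem pvBuildB_len (W : PySem.Set (List Char)) (frase : List Char) (i : Nat) :
    (pvBuildB W frase i).length = i + 1 := by
  induction i with
  | zero => rfl
  | succ k ih => simp [pvBuildB, ih]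

theorem pvBuildB_correct (palavras : List String) (frase : List Char) (i : Nat)
    (hi : i ≤ frase.length) :
    ∀ j, j ≤ i →
      (pvBuildB (PySem.Set.ofList (palavras.map String.toList)) frase i).getD j []
        = pvA (palavras.map String.toList) (frase.take j) := by
  induction i with
  | zero =>
    intro j hj
    have : j = 0 := Nat.le_zero.mp hj
    subst this
    simp [pvBuildB, pvA, pvCoreA]
  | succ i ih =>
    intro j hj
    have hdplen : (pvBuildB (PySem.Set.ofList (palavras.map String.toList)) frase i).length = i + 1 :=
      pvBuildB_len _ frase i
    by_cases hji : j ≤ i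
    · simp only [pvBuildB]
      rw [List.getD_append _ _ _ _ (by omega)]
      exact ih (by omega) j hji
    · have hj1 : j = i + 1 := by omega
      subst hj1
      simp only [pvBuildB]
      rw [List.getD_append_right _ _ _ _ (by omega), hdplen, Nat.sub_self]
      have hlenp : (frase.take (i + 1)).length = i + 1 := by
        simp [List.length_take]; omega
      have hne : frase.take (i + 1) ≠ [] := by
        intro h; rw [h] at hlenp; simp at hlenp
      have hdropnil : (frase.take (i + 1)).drop (i + 1) = [] := by
        apply List.drop_eq_nil_of_le; omega
      have key := pvLoop_eq palavras frase (pvBuildB (PySem.Set.ofList (palavras.map String.toList)) frase i)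
        (i + 1) hi i (by omega) (frase.take (i + 1)) (fun m hm => ih (by omega) m hm)
      rw [hdropnil] at key
      rw [List.getD_cons_zero]
      rw [show pvA (palavras.map String.toList) (frase.take (i + 1))
            = pvCoreA (palavras.map String.toList) (i + 1) (frase.take (i + 1)) from by rw [pvA, hlenp]]
      rw [show pvCoreA (palavras.map String.toList) (i + 1) (frase.take (i + 1))
            = pvLoopA (palavras.map String.toList) (pvCoreA (palavras.map String.toList) i)
                (frase.take (i + 1)) ((frase.take (i + 1)).length - 1) [] (frase.take (i + 1)) from by
          simp only [pvCoreA, if_neg hne]]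
      rw [hlenp, Nat.add_sub_cancel]
      rw [pvLoopA_congr (palavras.map String.toList) (pvCoreA (palavras.map String.toList) i)
            (pvA (palavras.map String.toList)) (frase.take (i + 1)) i [] (frase.take (i + 1))
            (fun k hk => by
              rw [List.take_take, Nat.min_eq_left (by omega)]
              exact pvA_take (palavras.map String.toList) frase k i hk)]
      rw [show ([] : List Char) = (frase.take (i + 1)).drop (i + 1) from hdropnil.symm] at key ⊢
      exact key.symm

-- ===== VERDICT (by name: the statement is the Claim_ definition above) =====
theorem espaca_spec : Claim_equal_espaca := by
  intro frase palavras _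
  unfold Spec_espaca espaca espaca_alt
  congr 1
  set W := palavras.map String.toList
  set cs := frase.toList
  have h := pvBuildB_correct palavras cs cs.length (le_refl _) cs.length (le_refl _)
  rw [List.take_length] at h
  rw [h, pvA]
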